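-- pv_equiv track=rewrite | github.com/Zubastic120993/word-app | app/services/import_service.py | _validate_referential_integrity
-- ===== SOURCE A (Python) =====
-- from typing import Any
--
-- def _validate_referential_integrity(data: dict[str, Any]) -> list[str]:
--     """Validate foreign key relationships."""
--     errors: list[str] = []
--
--     # Build sets of valid IDs
--     unit_ids = {u.get("id") for u in data.get("learning_units", []) if u.get("id")}
--     session_ids = {s.get("id") for s in data.get("learning_sessions", []) if s.get("id")}
--     vocabulary_ids = {v.get("id") for v in data.get("vocabularies", []) if v.get("id")}
--     vocabulary_group_ids = {
--         g.get("id") for g in data.get("vocabulary_groups", []) if g.get("id")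
--     }
--
--     # Validate learning_progress references valid units
--     for progress in data.get("learning_progress", []):
--         unit_id = progress.get("unit_id")
--         if unit_id and unit_id not in unit_ids:
--             errors.append(
--                 f"learning_progress references invalid unit_id: {unit_id}"
--             )
--
--     # Validate session_units references
--     for session_unit in data.get("session_units", []):
--         unit_id = session_unit.get("unit_id")
--         session_id = session_unit.get("session_id")
--
--         if unit_id and unit_id not in unit_ids:
--             errors.append(
--                 f"session_unit references invalid unit_id: {unit_id}"
--             )
--
--         if session_id and session_id not in session_ids:
--             errors.append(
--                 f"session_unit references invalid session_id: {session_id}"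
--             )
--
--     for unit in data.get("learning_units", []):
--         vocabulary_id = unit.get("vocabulary_id")
--         if vocabulary_id and vocabulary_id not in vocabulary_ids:
--             errors.append(
--                 f"learning_unit references invalid vocabulary_id: {vocabulary_id}"
--             )
--
--     for vocabulary in data.get("vocabularies", []):
--         group_id = vocabulary.get("group_id")
--         if group_id and group_id not in vocabulary_group_ids:
--             errors.append(
--                 f"vocabulary references invalid group_id: {group_id}"
--             )
--
--     for asset in data.get("audio_assets", []):
--         unit_id = asset.get("unit_id")
--         if unit_id and unit_id not in unit_ids:
--             errors.append(
--                 f"audio_asset references invalid unit_id: {unit_id}"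
--             )
--
--     return errors
-- ===== SOURCE B (Python) =====
-- def _validate_referential_integrity(data):
--     """Validate foreign key relationships by a collect-then-resolve nested-loop join:
--     first materialize every foreign-key claim in emission order, then resolve each
--     claim by scanning the target collection directly (no precomputed ID sets)."""
--     spec = [
--         ("learning_progress",
--          [("unit_id", "learning_units", "learning_progress references invalid unit_id")]),
--         ("session_units",
--          [("unit_id", "learning_units", "session_unit references invalid unit_id"),
--           ("session_id", "learning_sessions", "session_unit references invalid session_id")]),
--         ("learning_units",
--          [("vocabulary_id", "vocabularies", "learning_unit references invalid vocabulary_id")]),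
--         ("vocabularies",
--          [("group_id", "vocabulary_groups", "vocabulary references invalid group_id")]),
--         ("audio_assets",
--          [("unit_id", "learning_units", "audio_asset references invalid unit_id")]),
--     ]
--     claims = [(target, value, prefix)
--               for source, checks in spec
--               for row in data.get(source, [])
--               for field, target, prefix in checks
--               if (value := row.get(field))]
--     return [f"{prefix}: {value}"
--             for target, value, prefix in claims
--             if not any(r.get("id") == value for r in data.get(target, []))]
-- ===== Notes on version B (the rewrite author's own statement) =====
-- stated objective: alternative
-- what changed: A builds four hash-set indexes of valid IDs and checks membership inside five copy-pasted loops; B never builds any ID set: it first materializes the ordered list of foreign-key claims (target collection, value, message prefix) from a declarative spec, then resolves each claim by a nested-loop scan of the target collection (collect-then-resolve nested-loop join instead of indexed single pass).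
import Mathlib
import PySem

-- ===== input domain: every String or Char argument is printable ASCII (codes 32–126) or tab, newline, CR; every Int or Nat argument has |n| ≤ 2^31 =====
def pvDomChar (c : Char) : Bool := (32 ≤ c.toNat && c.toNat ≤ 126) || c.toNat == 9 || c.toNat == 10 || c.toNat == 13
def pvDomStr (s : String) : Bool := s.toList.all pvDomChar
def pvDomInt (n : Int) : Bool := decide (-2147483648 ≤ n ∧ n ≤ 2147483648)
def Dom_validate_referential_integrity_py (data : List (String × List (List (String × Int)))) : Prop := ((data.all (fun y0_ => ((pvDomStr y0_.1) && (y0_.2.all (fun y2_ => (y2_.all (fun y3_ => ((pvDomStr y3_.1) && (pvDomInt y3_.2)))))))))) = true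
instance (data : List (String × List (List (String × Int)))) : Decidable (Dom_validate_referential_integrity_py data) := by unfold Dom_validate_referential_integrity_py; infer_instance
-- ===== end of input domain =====

-- B replaces A's precomputed valid-ID sets and five copy-pasted loops by a collect-then-resolve
-- nested-loop join: materialize the ordered claim list, then scan the target collection per claim;
-- objective: alternative (no speed claim).

-- ===== PORT A =====
-- the set comprehension {u.get("id") for u in rows if u.get("id")}
def pvIdsA (rows : List (List (String × Int))) : PySem.Set Int :=
  rows.foldl (fun s r =>
    match (PySem.Dict.ofList r).get? "id" with
    | some v => if v != 0 then PySem.Set.add s v else s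
    | none => s) PySem.Set.empty

def validate_referential_integrity_py (data : List (String × List (List (String × Int)))) : List String :=
  let d := PySem.Dict.ofList data
  let unit_ids := pvIdsA (d.getD "learning_units" [])
  let session_ids := pvIdsA (d.getD "learning_sessions" [])
  let vocabulary_ids := pvIdsA (d.getD "vocabularies" [])
  let vocabulary_group_ids := pvIdsA (d.getD "vocabulary_groups" [])
  let errors : List String := []
  let errors := (d.getD "learning_progress" []).foldl (fun errors progress =>
    match (PySem.Dict.ofList progress).get? "unit_id" with
    | some unit_id =>
        if unit_id != 0 && !(PySem.Set.contains unit_ids unit_id) then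
          errors ++ ["learning_progress references invalid unit_id: " ++ PySem.Int.toStr unit_id]
        else errors
    | none => errors) errors
  let errors := (d.getD "session_units" []).foldl (fun errors session_unit =>
    let unit_id := (PySem.Dict.ofList session_unit).get? "unit_id"
    let session_id := (PySem.Dict.ofList session_unit).get? "session_id"
    let errors := match unit_id with
      | some v =>
          if v != 0 && !(PySem.Set.contains unit_ids v) then
            errors ++ ["session_unit references invalid unit_id: " ++ PySem.Int.toStr v]
          else errors
      | none => errors
    match session_id with
    | some v =>
        if v != 0 && !(PySem.Set.contains session_ids v) then
          errors ++ ["session_unit references invalid session_id: " ++ PySem.Int.toStr v]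
        else errors
    | none => errors) errors
  let errors := (d.getD "learning_units" []).foldl (fun errors unit =>
    match (PySem.Dict.ofList unit).get? "vocabulary_id" with
    | some vocabulary_id =>
        if vocabulary_id != 0 && !(PySem.Set.contains vocabulary_ids vocabulary_id) then
          errors ++ ["learning_unit references invalid vocabulary_id: " ++ PySem.Int.toStr vocabulary_id]
        else errors
    | none => errors) errors
  let errors := (d.getD "vocabularies" []).foldl (fun errors vocabulary =>
    match (PySem.Dict.ofList vocabulary).get? "group_id" with
    | some group_id =>
        if group_id != 0 && !(PySem.Set.contains vocabulary_group_ids group_id) then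
          errors ++ ["vocabulary references invalid group_id: " ++ PySem.Int.toStr group_id]
        else errors
    | none => errors) errors
  let errors := (d.getD "audio_assets" []).foldl (fun errors asset =>
    match (PySem.Dict.ofList asset).get? "unit_id" with
    | some unit_id =>
        if unit_id != 0 && !(PySem.Set.contains unit_ids unit_id) then
          errors ++ ["audio_asset references invalid unit_id: " ++ PySem.Int.toStr unit_id]
        else errors
    | none => errors) errors
  errors

-- ===== PORT B =====
def validate_referential_integrity_py_alt (data : List (String × List (List (String × Int)))) : List String :=
  let d := PySem.Dict.ofList data
  let spec : List (String × List (String × String × String)) :=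
    [("learning_progress",
      [("unit_id", "learning_units", "learning_progress references invalid unit_id")]),
     ("session_units",
      [("unit_id", "learning_units", "session_unit references invalid unit_id"),
       ("session_id", "learning_sessions", "session_unit references invalid session_id")]),
     ("learning_units",
      [("vocabulary_id", "vocabularies", "learning_unit references invalid vocabulary_id")]),
     ("vocabularies",
      [("group_id", "vocabulary_groups", "vocabulary references invalid group_id")]),
     ("audio_assets",
      [("unit_id", "learning_units", "audio_asset references invalid unit_id")])]
  let claims : List (String × Int × String) :=
    spec.flatMap (fun sc =>
      (d.getD sc.1 []).flatMap (fun row =>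
        sc.2.filterMap (fun c =>
          match (PySem.Dict.ofList row).get? c.1 with
          | some v => if v != 0 then some (c.2.1, v, c.2.2) else none
          | none => none)))
  claims.filterMap (fun tvp =>
    if !((d.getD tvp.1 []).any (fun r => (PySem.Dict.ofList r).get? "id" == some tvp.2.1)) then
      some (tvp.2.2 ++ ": " ++ PySem.Int.toStr tvp.2.1)
    else none)

-- ===== PRECONDITION & SPEC =====
def Spec_validate_referential_integrity_py (data : List (String × List (List (String × Int)))) (out : List String) : Prop := out = validate_referential_integrity_py_alt data
instance (data : List (String × List (List (String × Int)))) (out : List String) : Decidable (Spec_validate_referential_integrity_py data out) := by unfold Spec_validate_referential_integrity_py; infer_instance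

-- ===== CLAIM (what is proved, stated in full; the proofs are below) =====
def Claim_equal_validate_referential_integrity_py : Prop := ∀ (data : List (String × List (List (String × Int)))), Dom_validate_referential_integrity_py data → Spec_validate_referential_integrity_py data (validate_referential_integrity_py data)

-- ===== LEMMAS AND PROOFS =====

-- the error list contributed by one check on one row, membership via A's precomputed set
def pvCheckS (s : PySem.Set Int) (key msg : String) (row : List (String × Int)) : List String :=
  match (PySem.Dict.ofList row).get? key with
  | some v => if v != 0 && !(PySem.Set.contains s v) then [msg ++ PySem.Int.toStr v] else []
  | none => []

-- the same check, membership via B's direct scan of the target collection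
def pvCheck (target : List (List (String × Int))) (key msg : String) (row : List (String × Int)) : List String :=
  match (PySem.Dict.ofList row).get? key with
  | some v =>
      if v != 0 && !(target.any (fun r => (PySem.Dict.ofList r).get? "id" == some v)) then
        [msg ++ PySem.Int.toStr v]
      else []
  | none => []

-- A's id-collecting fold, from an arbitrary starting set (for the induction)
def pvIdsFrom (s : PySem.Set Int) (rows : List (List (String × Int))) : PySem.Set Int :=
  rows.foldl (fun s r =>
    match (PySem.Dict.ofList r).get? "id" with
    | some v => if v != 0 then PySem.Set.add s v else s
    | none => s) s

theorem pv_contains_add (s : PySem.Set Int) (x y : Int) :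
    PySem.Set.contains (PySem.Set.add s x) y = (PySem.Set.contains s y || y == x) := by
  have hm := PySem.Set.mem_add s x y
  by_cases hy : y ∈ PySem.Set.add s x
  · rcases hm.mp hy with h1 | h1
    · simp [PySem.Set.contains_eq_listContains, hy, h1]
    · subst h1; simp [PySem.Set.contains_eq_listContains, hy]
  · have h1 : y ∉ s := fun h => hy (hm.mpr (Or.inl h))
    have h2 : y ≠ x := fun h => hy (hm.mpr (Or.inr h))
    simp [PySem.Set.contains_eq_listContains, hy, h1, h2]

theorem pv_contains_pvIdsFrom (v : Int) (hv : v ≠ 0) :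
    ∀ (rows : List (List (String × Int))) (s : PySem.Set Int),
    PySem.Set.contains (pvIdsFrom s rows) v
      = (PySem.Set.contains s v || rows.any (fun r => (PySem.Dict.ofList r).get? "id" == some v)) := by
  intro rows
  induction rows with
  | nil => intro s; simp [pvIdsFrom]
  | cons r rs ih =>
    intro s
    have hstep : pvIdsFrom s (r :: rs)
        = pvIdsFrom (match (PySem.Dict.ofList r).get? "id" with
            | some w => if w != 0 then PySem.Set.add s w else s
            | none => s) rs := rfl
    rw [hstep]
    cases h : (PySem.Dict.ofList r).get? "id" with
    | none =>
      simp only [h]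
      rw [ih]
      simp [List.any_cons, h]
    | some w =>
      by_cases hw : w = 0
      · subst hw
        have hne : (some (0:Int) == some v) = false := by simp [Ne.symm hv]
        simp only [h]
        rw [show (if (((0:Int) != 0) = true) then PySem.Set.add s 0 else s) = s by simp]
        rw [ih]
        simp [List.any_cons, h, hne]
      · simp only [h]
        rw [show (if ((w != 0) = true) then PySem.Set.add s w else s) = PySem.Set.add s w by
          simp [hw]]
        rw [ih, pv_contains_add]
        have hwv : (some w == some v) = (v == w) := by
          by_cases hcase : w = v
          · subst hcase; simp
          · simp [hcase, Ne.symm hcase]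
        simp [List.any_cons, h, hwv, Bool.or_assoc]

theorem pv_contains_pvIdsA (target : List (List (String × Int))) (v : Int) (hv : v ≠ 0) :
    PySem.Set.contains (pvIdsA target) v
      = target.any (fun r => (PySem.Dict.ofList r).get? "id" == some v) := by
  have : pvIdsA target = pvIdsFrom PySem.Set.empty target := rfl
  rw [this, pv_contains_pvIdsFrom v hv]
  simp [PySem.Set.empty, PySem.Set.contains_eq_listContains]

-- the set-based check over A's collected ids IS the direct scan
theorem pvCheckS_eq (target : List (List (String × Int))) (key msg : String) :
    pvCheckS (pvIdsA target) key msg = pvCheck target key msg := by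
  funext row
  unfold pvCheckS pvCheck
  cases h : (PySem.Dict.ofList row).get? key with
  | none => rfl
  | some v =>
    dsimp only
    by_cases hv : v = 0
    · subst hv; simp
    · rw [pv_contains_pvIdsA target v hv]

theorem pv_foldl_flatMap {α : Type} (step : List String → α → List String)
    (g : α → List String) (h : ∀ acc x, step acc x = acc ++ g x) :
    ∀ (l : List α) (acc : List String), l.foldl step acc = acc ++ l.flatMap g := by
  intro l
  induction l with
  | nil => intro acc; simp
  | cons x xs ih => intro acc; simp [List.foldl_cons, h, ih, List.flatMap_cons]

-- one of A's single-check loops, as a flatMap of per-row checks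
theorem pv_loop1 (s : PySem.Set Int) (key msg : String)
    (l : List (List (String × Int))) (acc : List String) :
    l.foldl (fun errors row =>
      match (PySem.Dict.ofList row).get? key with
      | some v =>
          if v != 0 && !(PySem.Set.contains s v) then
            errors ++ [msg ++ PySem.Int.toStr v]
          else errors
      | none => errors) acc
    = acc ++ l.flatMap (pvCheckS s key msg) := by
  apply pv_foldl_flatMap
  intro acc x
  unfold pvCheckS
  cases (PySem.Dict.ofList x).get? key <;>
    (dsimp only; (try split_ifs) <;>
      first | rfl | simp only [List.append_assoc, List.append_nil, List.nil_append])

-- A's session_units loop (two sequential checks per row), as a flatMap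
theorem pv_loop2 (u s : PySem.Set Int) (m1 m2 : String)
    (l : List (List (String × Int))) (acc : List String) :
    l.foldl (fun errors session_unit =>
      match (PySem.Dict.ofList session_unit).get? "session_id" with
      | some v =>
        if v != 0 && !(PySem.Set.contains s v) then
          (match (PySem.Dict.ofList session_unit).get? "unit_id" with
            | some v =>
              if v != 0 && !(PySem.Set.contains u v) then
                errors ++ [m1 ++ PySem.Int.toStr v]
              else errors
            | none => errors) ++
            [m2 ++ PySem.Int.toStr v]
        else
          match (PySem.Dict.ofList session_unit).get? "unit_id" with
          | some v =>
            if v != 0 && !(PySem.Set.contains u v) then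
              errors ++ [m1 ++ PySem.Int.toStr v]
            else errors
          | none => errors
      | none =>
        match (PySem.Dict.ofList session_unit).get? "unit_id" with
        | some v =>
          if v != 0 && !(PySem.Set.contains u v) then
            errors ++ [m1 ++ PySem.Int.toStr v]
          else errors
        | none => errors) acc
    = acc ++ l.flatMap (fun row => pvCheckS u "unit_id" m1 row ++ pvCheckS s "session_id" m2 row) := by
  apply pv_foldl_flatMap
  intro acc x
  unfold pvCheckS
  cases (PySem.Dict.ofList x).get? "session_id" <;> cases (PySem.Dict.ofList x).get? "unit_id" <;>
    (dsimp only; (try split_ifs) <;>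
      first | rfl | simp only [List.append_assoc, List.append_nil, List.nil_append])

-- filterMap distributes over flatMap
theorem pv_filterMap_flatMap {α β γ : Type} (l : List α) (g : α → List β) (f : β → Option γ) :
    (l.flatMap g).filterMap f = l.flatMap (fun a => (g a).filterMap f) := by
  induction l with
  | nil => simp
  | cons x xs ih => simp [List.flatMap_cons, List.filterMap_append, ih]

-- B's resolution of the claims one row of a one-check spec entry yields = the direct-scan check
theorem pv_resolve1 (d : PySem.Dict String (List (List (String × Int))))
    (key tgt pre : String) (row : List (String × Int)) :
    ((List.filterMap (fun c : String × String × String =>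
        match (PySem.Dict.ofList row).get? c.1 with
        | some v => if v != 0 then some (c.2.1, v, c.2.2) else none
        | none => none) [(key, tgt, pre)]).filterMap (fun tvp : String × Int × String =>
      if !((d.getD tvp.1 []).any (fun r => (PySem.Dict.ofList r).get? "id" == some tvp.2.1)) then
        some (tvp.2.2 ++ ": " ++ PySem.Int.toStr tvp.2.1)
      else none))
    = pvCheck (d.getD tgt []) key (pre ++ ": ") row := by
  unfold pvCheck
  simp only [List.filterMap_cons, List.filterMap_nil]
  cases h : (PySem.Dict.ofList row).get? key with
  | none => rfl
  | some v =>
    dsimp only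
    split_ifs with h1 h2 h3 <;>
      first
        | (simp only [List.filterMap_cons, List.filterMap_nil]; split_ifs <;> simp_all [String.append_assoc])
        | simp_all

-- same for the two-check spec entry of session_units
theorem pv_resolve2 (d : PySem.Dict String (List (List (String × Int))))
    (k1 t1 p1 k2 t2 p2 : String) (row : List (String × Int)) :
    ((List.filterMap (fun c : String × String × String =>
        match (PySem.Dict.ofList row).get? c.1 with
        | some v => if v != 0 then some (c.2.1, v, c.2.2) else none
        | none => none) [(k1, t1, p1), (k2, t2, p2)]).filterMap (fun tvp : String × Int × String =>
      if !((d.getD tvp.1 []).any (fun r => (PySem.Dict.ofList r).get? "id" == some tvp.2.1)) then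
        some (tvp.2.2 ++ ": " ++ PySem.Int.toStr tvp.2.1)
      else none))
    = pvCheck (d.getD t1 []) k1 (p1 ++ ": ") row ++ pvCheck (d.getD t2 []) k2 (p2 ++ ": ") row := by
  unfold pvCheck
  simp only [List.filterMap_cons, List.filterMap_nil]
  cases h1 : (PySem.Dict.ofList row).get? k1 <;> cases h2 : (PySem.Dict.ofList row).get? k2 <;>
    (dsimp only; (try split_ifs) <;>
      (try simp only [List.filterMap_cons, List.filterMap_nil]) <;> (try split_ifs) <;>
      simp_all [String.append_assoc])

-- ===== VERDICT (by name: the statement is the Claim_ definition above) =====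
theorem validate_referential_integrity_py_spec : Claim_equal_validate_referential_integrity_py := by
  intro data _
  unfold Spec_validate_referential_integrity_py
  simp only [validate_referential_integrity_py, validate_referential_integrity_py_alt]
  simp only [pv_loop1, pv_loop2]
  simp only [pvCheckS_eq]
  simp only [List.flatMap_cons, List.flatMap_nil, List.filterMap_append, List.append_nil,
    pv_filterMap_flatMap]
  simp only [pv_resolve1, pv_resolve2]
  rw [show ("learning_progress references invalid unit_id" ++ ": " : String) = "learning_progress references invalid unit_id: " from rfl,
      show ("session_unit references invalid unit_id" ++ ": " : String) = "session_unit references invalid unit_id: " from rfl,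
      show ("session_unit references invalid session_id" ++ ": " : String) = "session_unit references invalid session_id: " from rfl,
      show ("learning_unit references invalid vocabulary_id" ++ ": " : String) = "learning_unit references invalid vocabulary_id: " from rfl,
      show ("vocabulary references invalid group_id" ++ ": " : String) = "vocabulary references invalid group_id: " from rfl,
      show ("audio_asset references invalid unit_id" ++ ": " : String) = "audio_asset references invalid unit_id: " from rfl]
  simp only [List.append_assoc, List.append_nil, List.nil_append]
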